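-- pv_equiv track=rewrite | github.com/markossta/aied_2025_video_qg | src/data_processing/dataset_splitter.py | count_teded_questions
-- ===== SOURCE A (Python) =====
-- def count_teded_questions(data, idx):
--     amount_questions = 0
--     amount_multiple = 0
--     amount_open = 0
--     for key in idx:
--         amount_questions += len(data[key])
--         for question in data[key]:
--             if question["question_type"] == "multiple-choices":
--                 amount_multiple +=1
--             else:
--                 amount_open += 1
--     return amount_questions, amount_multiple, amount_open
-- ===== SOURCE B (Python) =====
-- def count_teded_questions(data, idx):
--     # Stage 1: collect every selected question's type; Stage 2: histogram it;
--     # Stage 3: read all three answers off the histogram.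
--     types = [q["question_type"] for key in idx for q in data[key]]
--     tally = {}
--     for t in types:
--         tally[t] = tally.get(t, 0) + 1
--     total = sum(tally.values())
--     multiple = tally.get("multiple-choices", 0)
--     return total, multiple, total - multiple
-- ===== Notes on version B (the rewrite author's own statement) =====
-- stated objective: alternative
-- what changed: Instead of three running counters updated inside the nested loop, B first extracts the list of question types, builds a frequency histogram (dict) over it, and then derives total = sum of histogram values, multiple = histogram lookup, open = total - multiple.
import Mathlib
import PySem

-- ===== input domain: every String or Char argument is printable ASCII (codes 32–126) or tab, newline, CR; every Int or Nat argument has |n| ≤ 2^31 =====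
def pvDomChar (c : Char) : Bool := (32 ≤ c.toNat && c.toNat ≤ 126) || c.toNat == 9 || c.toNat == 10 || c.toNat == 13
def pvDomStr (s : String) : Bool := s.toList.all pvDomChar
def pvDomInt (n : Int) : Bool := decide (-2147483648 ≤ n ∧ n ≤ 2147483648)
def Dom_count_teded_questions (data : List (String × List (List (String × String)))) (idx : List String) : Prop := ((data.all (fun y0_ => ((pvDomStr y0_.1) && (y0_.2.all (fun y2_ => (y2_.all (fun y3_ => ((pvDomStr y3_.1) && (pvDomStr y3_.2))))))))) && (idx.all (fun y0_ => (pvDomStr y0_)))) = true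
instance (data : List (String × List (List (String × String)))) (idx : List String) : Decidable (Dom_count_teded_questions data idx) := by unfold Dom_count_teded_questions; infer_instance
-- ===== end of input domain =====

-- B replaces A's three in-loop counters by staged passes: extract the type list, build a
-- frequency histogram over it, and read total/multiple/open off the histogram (alternative, same cost).


-- ===== PORT A =====
-- first-match association lookup = Python dict access (KeyError -> none; Pre_ excludes none)
def pvLookup? {T : Type} (d : List (String × T)) (k : String) : Option T :=
  match d with
  | [] => none
  | (k', v) :: rest => if k' == k then some v else pvLookup? rest k

def count_teded_questions (data : List (String × List (List (String × String)))) (idx : List String) : Int × Int × Int :=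
  idx.foldl (fun s key =>
    let qs := (pvLookup? data key).getD []
    let s1 : Int × Int × Int := (s.1 + qs.length, s.2.1, s.2.2)
    qs.foldl (fun t q =>
      if pvLookup? q "question_type" = some "multiple-choices"
      then (t.1, t.2.1 + 1, t.2.2)
      else (t.1, t.2.1, t.2.2 + 1)) s1) (0, 0, 0)

-- ===== PORT B =====
-- B's per-question type extraction, q["question_type"] (KeyError -> "" placeholder; Pre_ excludes none)
def pvTyp (q : List (String × String)) : String := (pvLookup? q "question_type").getD ""

def count_teded_questions_alt (data : List (String × List (List (String × String)))) (idx : List String) : Int × Int × Int :=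
  let types : List String := idx.flatMap (fun key =>
    ((pvLookup? data key).getD []).map pvTyp)
  let tally : PySem.Dict String Int :=
    types.foldl (fun d t => d.insert t (d.getD t 0 + 1)) PySem.Dict.empty
  let total : Int := tally.values.sum
  let multiple : Int := tally.getD "multiple-choices" 0
  (total, multiple, total - multiple)

-- ===== PRECONDITION & SPEC =====
-- Pre_ excludes exactly the inputs where Python A raises KeyError: an idx key missing
-- from data, or a question lacking the "question_type" key (B raises there too).
def Pre_count_teded_questions (data : List (String × List (List (String × String)))) (idx : List String) : Prop :=
  ∀ key ∈ idx, (data.lookup key).isSome ∧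
    ∀ q ∈ (data.lookup key).getD [], (q.lookup "question_type").isSome

instance (data : List (String × List (List (String × String)))) (idx : List String) : Decidable (Pre_count_teded_questions data idx) := by unfold Pre_count_teded_questions; infer_instance

def pvWitness_count_teded_questions : (List (String × List (List (String × String)))) × List String :=
  ([("x", [[("question_type", "multiple-choices")], [("question_type", "open")]]), ("y", [])], ["x", "y"])

def Spec_count_teded_questions (data : List (String × List (List (String × String)))) (idx : List String) (out : Int × Int × Int) : Prop := out = count_teded_questions_alt data idx
instance (data : List (String × List (List (String × String)))) (idx : List String) (out : Int × Int × Int) : Decidable (Spec_count_teded_questions data idx out) := by unfold Spec_count_teded_questions; infer_instance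

-- ===== CLAIM (what is proved, stated in full; the proofs are below) =====
def Claim_equal_count_teded_questions : Prop := ∀ (data : List (String × List (List (String × String)))) (idx : List String), Dom_count_teded_questions data idx → Pre_count_teded_questions data idx → Spec_count_teded_questions data idx (count_teded_questions data idx)

-- ===== LEMMAS AND PROOFS =====

-- A's branch condition coincides with counting "multiple-choices" among the extracted types
theorem pvCond (q : List (String × String)) :
    (pvLookup? q "question_type" = some "multiple-choices") ↔ pvTyp q = "multiple-choices" := by
  unfold pvTyp
  cases h : pvLookup? q "question_type" with
  | none => simp [Option.getD]
  | some s => simp [Option.getD]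

theorem pvInner (qs : List (List (String × String))) (a b c : Int) :
    qs.foldl (fun t q =>
      if pvLookup? q "question_type" = some "multiple-choices"
      then (t.1, t.2.1 + 1, t.2.2)
      else (t.1, t.2.1, t.2.2 + 1)) (a, b, c)
    = (a, b + ((qs.map pvTyp).count "multiple-choices" : Int),
          c + ((qs.length : Int) - ((qs.map pvTyp).count "multiple-choices" : Int))) := by
  induction qs generalizing b c with
  | nil => simp
  | cons q qs ih =>
    simp only [List.foldl_cons, List.map_cons, List.length_cons]
    by_cases h : pvLookup? q "question_type" = some "multiple-choices"
    · have ht : pvTyp q = "multiple-choices" := (pvCond q).mp h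
      rw [if_pos h, ih]
      simp [ht]
      omega
    · have ht : ¬ pvTyp q = "multiple-choices" := fun hc => h ((pvCond q).mpr hc)
      rw [if_neg h, ih]
      simp [ht]
      omega

def pvTypes (data : List (String × List (List (String × String)))) (idx : List String) : List String :=
  idx.flatMap (fun key => ((pvLookup? data key).getD []).map pvTyp)

theorem pvOuter (data : List (String × List (List (String × String)))) (idx : List String) (a b c : Int) :
    idx.foldl (fun s key =>
      let qs := (pvLookup? data key).getD []
      let s1 : Int × Int × Int := (s.1 + qs.length, s.2.1, s.2.2)
      qs.foldl (fun t q =>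
        if pvLookup? q "question_type" = some "multiple-choices"
        then (t.1, t.2.1 + 1, t.2.2)
        else (t.1, t.2.1, t.2.2 + 1)) s1) (a, b, c)
    = (a + ((pvTypes data idx).length : Int),
       b + ((pvTypes data idx).count "multiple-choices" : Int),
       c + (((pvTypes data idx).length : Int) - ((pvTypes data idx).count "multiple-choices" : Int))) := by
  induction idx generalizing a b c with
  | nil => simp [pvTypes]
  | cons k idx ih =>
    simp only [List.foldl_cons]
    rw [pvInner, ih]
    simp only [pvTypes, List.flatMap_cons, List.length_append, List.count_append,
      List.length_map]
    refine Prod.ext ?_ (Prod.ext ?_ ?_) <;> push_cast <;> ring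

-- the histogram's values sum to the length of the tallied list
theorem pvSumCounts (xs : List String) :
    ((PySem.Set.ofList xs).map (fun k => (xs.count k : Int))).sum = (xs.length : Int) := by
  have hperm : (PySem.Set.ofList xs).Perm xs.dedup := by
    rw [List.perm_ext_iff_of_nodup (PySem.Set.nodup_ofList xs) xs.nodup_dedup]
    intro y
    rw [PySem.Set.mem_ofList, List.mem_dedup]
  rw [List.Perm.sum_eq (hperm.map _), ← List.sum_map_count_dedup_eq_length xs,
    Nat.cast_list_sum, List.map_map]
  rfl

-- ===== VERDICT (by name: the statement is the Claim_ definition above) =====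
theorem count_teded_questions_spec : Claim_equal_count_teded_questions := by
  intro data idx _ _
  unfold Spec_count_teded_questions count_teded_questions count_teded_questions_alt
  rw [pvOuter]
  simp only [PySem.Dict.foldl_insert_getD_add_one_eq_counter, PySem.Dict.getD_counter,
    PySem.Dict.values, PySem.Dict.items_counter, List.map_map, Function.comp_def]
  have h := pvSumCounts (pvTypes data idx)
  simp only [pvTypes] at h
  rw [h]
  simp [pvTypes]
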